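-- pv_equiv track=rewrite | github.com/Pranichek/WebQuiz | online_passing/passing_views.py | find_percentage
-- ===== SOURCE A (Python) =====
-- def find_percentage(data: list) -> list:
--     percentage = []
--     for i in range(data.__len__()):
--         one = []
--         prev_sum = 0
--         for prev_i in range(data.__len__()):
--             if (prev_i < i):
--                 prev_sum += data[prev_i]
--             else:
--                 break
--         one.append(prev_sum)
--         one.append(prev_sum + data[i])
--         percentage.append(one)
--     return percentage
-- ===== SOURCE B (Python) =====
-- def find_percentage(data: list) -> list:
--     percentage = []
--     running = 0
--     for x in data:
--         percentage.append([running, running + x])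
--         running += x
--     return percentage
-- ===== Notes on version B (the rewrite author's own statement) =====
-- stated objective: faster
-- what changed: Replaces the quadratic re-summation of the prefix for every index by a single pass that maintains a running prefix sum.
import Mathlib
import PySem

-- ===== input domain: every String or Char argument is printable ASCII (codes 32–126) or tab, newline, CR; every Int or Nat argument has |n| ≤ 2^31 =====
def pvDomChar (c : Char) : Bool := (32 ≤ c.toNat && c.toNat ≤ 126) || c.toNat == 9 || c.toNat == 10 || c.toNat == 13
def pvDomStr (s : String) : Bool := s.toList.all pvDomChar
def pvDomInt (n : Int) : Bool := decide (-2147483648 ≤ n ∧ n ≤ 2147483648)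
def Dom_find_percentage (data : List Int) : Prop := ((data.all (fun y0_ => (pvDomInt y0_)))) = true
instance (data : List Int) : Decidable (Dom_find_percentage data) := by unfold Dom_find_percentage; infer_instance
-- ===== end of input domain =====

-- B replaces A's quadratic re-summation of the prefix for every index by one pass with a running prefix sum.

-- ===== PORT A =====
-- inner loop 'for prev_i in range(len(data)): if prev_i < i: prev_sum += data[prev_i] else: break'
def pvAInner (data : List Int) (i : Int) : List Int → Int → Int
  | [], s => s
  | p :: rest, s =>
    if p < i then pvAInner data i rest (s + PySem.List.pyGetD data p 0)
    else s

def find_percentage (data : List Int) : List (List Int) :=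
  (PySem.List.pyRange 0 (PySem.List.len data) 1).foldl
    (fun percentage i =>
      let prev_sum := pvAInner data i (PySem.List.pyRange 0 (PySem.List.len data) 1) 0
      percentage ++ [[prev_sum, prev_sum + PySem.List.pyGetD data i 0]]) []

-- ===== PORT B =====
def pvBGo : List Int → Int → List (List Int)
  | [], _ => []
  | x :: rest, running => [running, running + x] :: pvBGo rest (running + x)

def find_percentage_alt (data : List Int) : List (List Int) :=
  pvBGo data 0

-- ===== PRECONDITION & SPEC =====
def Spec_find_percentage (data : List Int) (out : List (List Int)) : Prop := out = find_percentage_alt data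
instance (data : List Int) (out : List (List Int)) : Decidable (Spec_find_percentage data out) := by unfold Spec_find_percentage; infer_instance

-- ===== CLAIM (what is proved, stated in full; the proofs are below) =====
def Claim_equal_find_percentage : Prop := ∀ (data : List Int), Dom_find_percentage data → Spec_find_percentage data (find_percentage data)

-- ===== LEMMAS AND PROOFS =====

-- A's inner loop sums data[p] over the longest prefix of the index list with p < i.
theorem pvAInner_eq (data : List Int) (i : Int) :
    ∀ (l : List Int) (s : Int), pvAInner data i l s =
      s + ((l.takeWhile (fun p => decide (p < i))).map (fun p => PySem.List.pyGetD data p 0)).sum := by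
  intro l
  induction l with
  | nil => intro s; simp [pvAInner]
  | cons p rest ih =>
    intro s
    by_cases h : p < i
    · simp [pvAInner, h, ih]; ring
    · simp [pvAInner, h]

theorem takeWhile_pyRange (m : Nat) : ∀ (i a b : Int), (b - a).toNat = m → i ≤ b →
    (PySem.List.pyRange a b 1).takeWhile (fun p => decide (p < i)) = PySem.List.pyRange a i 1 := by
  induction m with
  | zero =>
    intro i a b hm hib
    have hba : b ≤ a := by omega
    rw [PySem.List.pyRange_one_eq_nil hba, PySem.List.pyRange_one_eq_nil (by omega)]
    rfl
  | succ m ih =>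
    intro i a b hm hib
    have hab : a < b := by omega
    rw [PySem.List.pyRange_one_cons hab]
    by_cases hai : a < i
    · rw [List.takeWhile_cons_of_pos (by simpa using hai),
        ih i (a + 1) b (by omega) hib, PySem.List.pyRange_one_cons hai]
    · rw [List.takeWhile_cons_of_neg (by simpa using hai),
        PySem.List.pyRange_one_eq_nil (by omega)]

theorem map_pyGetD_range_take (data : List Int) : ∀ (k : Nat), k ≤ data.length →
    (PySem.List.pyRange 0 (k : Int) 1).map (fun p => PySem.List.pyGetD data p 0) = data.take k := by
  intro k
  induction k with
  | zero => intro _; simp [PySem.List.pyRange_one_eq_nil]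
  | succ k ih =>
    intro hk
    rw [show ((k + 1 : Nat) : Int) = (k : Int) + 1 by push_cast; ring,
      PySem.List.pyRange_one_succ_right (by positivity), List.map_append, ih (by omega)]
    have hg : PySem.List.pyGetD data ((k : Nat) : Int) 0 = data[k] := by
      rw [PySem.List.pyGetD_natCast]
      exact List.getD_eq_getElem data 0 (by omega)
    rw [List.map_cons, List.map_nil, hg, List.take_add_one,
      List.getElem?_eq_getElem (by omega : k < data.length)]
    rfl

-- A's k-th entry is [sum of take k, sum of take (k+1)].
theorem find_percentage_closed (data : List Int) :
    find_percentage data = (List.range data.length).map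
      (fun k => [(data.take k).sum, (data.take (k + 1)).sum]) := by
  unfold find_percentage
  rw [PySem.List.foldl_append_singleton_eq_map]
  have hstep : (PySem.List.pyRange 0 (PySem.List.len data) 1).map
      (fun i => [pvAInner data i (PySem.List.pyRange 0 (PySem.List.len data) 1) 0,
        pvAInner data i (PySem.List.pyRange 0 (PySem.List.len data) 1) 0 + PySem.List.pyGetD data i 0])
      = (PySem.List.pyRange 0 (PySem.List.len data) 1).map
      (fun i => [(data.take i.toNat).sum, (data.take (i.toNat + 1)).sum]) := by
    apply List.map_congr_left
    intro i hi
    rw [PySem.List.len_eq, PySem.List.mem_pyRange_one] at hi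
    obtain ⟨h0, hn⟩ := hi
    have hk : i = ((i.toNat : Nat) : Int) := by omega
    have hkn : i.toNat < data.length := by omega
    rw [pvAInner_eq, PySem.List.len_eq,
      takeWhile_pyRange ((data.length : Int) - 0).toNat i 0 (data.length : Int) rfl (by omega),
      hk, map_pyGetD_range_take data i.toNat hkn.le]
    have hg : PySem.List.pyGetD data ((i.toNat : Nat) : Int) 0 = data[i.toNat] := by
      rw [PySem.List.pyGetD_natCast]
      exact List.getD_eq_getElem data 0 hkn
    have ht : (data.take (i.toNat + 1)).sum = (data.take i.toNat).sum + data[i.toNat] := by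
      rw [List.take_add_one, List.getElem?_eq_getElem hkn]
      simp only [Option.toList_some, List.sum_append, List.sum_cons, List.sum_nil, add_zero]
    rw [hg]
    simp only [Int.toNat_natCast, zero_add, ht]
  rw [hstep, PySem.List.len_eq, PySem.List.pyRange_zero_nat, List.map_map]
  apply List.map_congr_left
  intro k _
  simp

theorem pvBGo_closed (data : List Int) : ∀ (s : Int),
    pvBGo data s = (List.range data.length).map
      (fun k => [s + (data.take k).sum, s + (data.take (k + 1)).sum]) := by
  induction data with
  | nil => intro s; simp [pvBGo]
  | cons x rest ih =>
    intro s
    rw [pvBGo, ih (s + x)]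
    simp only [List.length_cons, List.range_succ_eq_map, List.map_cons, List.map_map]
    congr 1
    · simp
    · apply List.map_congr_left
      intro k _
      simp only [Function.comp_apply, List.take_succ_cons, List.sum_cons]
      have h1 : s + x + (rest.take k).sum = s + (x + (rest.take k).sum) := by ring
      have h2 : s + x + (rest.take (k + 1)).sum = s + (x + (rest.take (k + 1)).sum) := by ring
      rw [h1, h2]

-- ===== VERDICT (by name: the statement is the Claim_ definition above) =====
theorem find_percentage_spec : Claim_equal_find_percentage := by
  intro data _
  unfold Spec_find_percentage find_percentage_alt
  rw [find_percentage_closed, pvBGo_closed]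
  simp
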